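-- pv_equiv track=rewrite | github.com/yantor3d/tiny-sg | src/tinysg/entity.py | _get
-- ===== SOURCE A (Python) =====
-- import itertools
-- import enum
-- from typing import Mapping, List
--
-- class Fields(enum.Enum):
--     """Entity field enums."""
--
--     CODE = "code"
--     ID = "id"
--     NAME = "name"
--     TYPE = "type"
--     PROJECT = "project"
--
-- def _get(entity: dict, return_fields: List[str] = None):
--     """Return the payload for the given return fields."""
--
--     default_fields = [
--         Fields.TYPE.value,
--         Fields.ID.value,
--     ]
--
--     if return_fields is None:
--         return entity
--
--     return {
--         field: entity[field]
--         for field in itertools.chain(default_fields, return_fields)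
--         if field in entity
--     }
-- ===== SOURCE B (Python) =====
-- def _get(entity: dict, return_fields=None):
--     """Return the payload for the given return fields."""
--
--     if return_fields is None:
--         return entity
--
--     # Index each wanted field by its priority (first position in the chain).
--     rank = {}
--     for i, field in enumerate(("type", "id", *return_fields)):
--         rank.setdefault(field, i)
--
--     # Drive the loop over the ENTITY, keeping only wanted fields, then
--     # restore the field-chain order by sorting on the priority.
--     hits = [(rank[key], key, value) for key, value in entity.items() if key in rank]
--     hits.sort(key=lambda hit: hit[0])
--
--     return {key: value for _, key, value in hits}
-- ===== Notes on version B (the rewrite author's own statement) =====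
-- stated objective: alternative
-- what changed: Instead of looping over the chained field list and probing the entity per field, B builds a priority index of the wanted fields (first position in the chain), drives the loop over the entity items filtering by that index, and sorts the hits by priority to restore A's field order.
import Mathlib
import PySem

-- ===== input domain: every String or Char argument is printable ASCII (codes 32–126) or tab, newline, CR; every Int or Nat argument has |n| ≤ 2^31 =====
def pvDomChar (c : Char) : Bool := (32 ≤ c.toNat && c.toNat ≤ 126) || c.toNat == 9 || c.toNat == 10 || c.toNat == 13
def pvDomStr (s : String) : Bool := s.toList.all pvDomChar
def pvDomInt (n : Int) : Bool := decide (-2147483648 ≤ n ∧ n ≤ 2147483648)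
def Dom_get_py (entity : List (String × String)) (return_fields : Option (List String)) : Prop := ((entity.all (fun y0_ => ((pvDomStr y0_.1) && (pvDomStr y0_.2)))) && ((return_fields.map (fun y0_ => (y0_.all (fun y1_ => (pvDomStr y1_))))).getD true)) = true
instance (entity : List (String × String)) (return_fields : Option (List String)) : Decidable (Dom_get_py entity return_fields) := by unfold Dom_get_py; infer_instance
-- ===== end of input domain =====

-- B replaces A's loop over the chained field list with a priority index of the wanted
-- fields, a filtering pass over the entity items, and a sort by priority that restores
-- A's field order (alternative algorithm, same result).


-- ===== PORT A =====
-- A: {field: entity[field] for field in chain(default_fields, return_fields) if field in entity}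
-- entity[field] is guarded by 'field in entity', so the getD default is never used.
def get_py (entity : List (String × String)) (return_fields : Option (List String)) : List (String × String) :=
  match return_fields with
  | none => entity
  | some fs =>
    ((["type", "id"] ++ fs).foldl
      (fun (payload : PySem.Dict String String) field =>
        if (PySem.Dict.mk entity).contains field then
          payload.insert field (((PySem.Dict.mk entity).get? field).getD "")
        else payload)
      PySem.Dict.empty).items

-- ===== PORT B =====
-- B: rank = first position of each wanted field; filter entity items by the rank index,
-- sort the hits by rank, build the dict from the sorted pairs.
def get_py_alt (entity : List (String × String)) (return_fields : Option (List String)) : List (String × String) :=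
  match return_fields with
  | none => entity
  | some fs =>
    let rank : PySem.Dict String Int :=
      (PySem.List.enumerate ("type" :: "id" :: fs) 0).foldl
        (fun r p => r.setdefault p.2 p.1) PySem.Dict.empty
    let hits : List (Int × String × String) :=
      ((PySem.Dict.mk entity).items.filter (fun p => rank.contains p.1)).map
        (fun p => (rank.getD p.1 0, p.1, p.2))
    ((PySem.Dict.ofList
        ((PySem.List.sorted hits (fun hit => hit.1) false).map (fun t => (t.2.1, t.2.2))))).items

-- ===== PRECONDITION & SPEC =====
-- entity models a Python dict, whose keys are necessarily distinct: association lists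
-- with duplicate keys correspond to no Python input, so Pre_ requires distinct keys.
def Pre_get_py (entity : List (String × String)) (return_fields : Option (List String)) : Prop :=
  (entity.map Prod.fst).Nodup
instance (entity : List (String × String)) (return_fields : Option (List String)) : Decidable (Pre_get_py entity return_fields) := by unfold Pre_get_py; infer_instance
def pvWitness_get_py : (List (String × String)) × Option (List String) :=
  ([("type", "Asset"), ("id", "1"), ("code", "bob")], some ["code", "name"])
def Spec_get_py (entity : List (String × String)) (return_fields : Option (List String)) (out : List (String × String)) : Prop := out = get_py_alt entity return_fields
instance (entity : List (String × String)) (return_fields : Option (List String)) (out : List (String × String)) : Decidable (Spec_get_py entity return_fields out) := by unfold Spec_get_py; infer_instance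

-- ===== CLAIM (what is proved, stated in full; the proofs are below) =====
def Claim_equal_get_py : Prop := ∀ (entity : List (String × String)) (return_fields : Option (List String)), Dom_get_py entity return_fields → Pre_get_py entity return_fields → Spec_get_py entity return_fields (get_py entity return_fields)

-- ===== LEMMAS AND PROOFS =====

theorem idxOf_append_self_of_not_mem (l : List String) (x : String) (h : x ∉ l) :
    (l ++ [x]).idxOf x = l.length := by
  induction l with
  | nil => simp
  | cons a t ih =>
    simp only [List.mem_cons, not_or] at h
    rw [List.cons_append, List.idxOf_cons_ne _ (fun e => h.1 e.symm), ih h.2]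
    simp

theorem ofList_append_singleton (m : List String) (y : String) :
    PySem.Set.ofList (m ++ [y]) = PySem.Set.add (PySem.Set.ofList m) y := by
  rw [PySem.Set.ofList_eq_foldl, PySem.Set.ofList_eq_foldl, List.foldl_append]; rfl

-- getD after a fold of inserts whose value depends only on the key.
theorem getD_foldl_insert_value (l : List String) (V : String → String)
    (d0 : PySem.Dict String String) (k dflt : String) :
    (l.foldl (fun d f => d.insert f (V f)) d0).getD k dflt
      = if k ∈ l then V k else d0.getD k dflt := by
  induction l generalizing d0 with
  | nil => simp
  | cons f t ih =>
    rw [List.foldl_cons, ih]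
    by_cases hkt : k ∈ t
    · simp [hkt]
    · by_cases hkf : k = f
      · simp [hkf, PySem.Dict.getD_insert_self]
      · simp [hkt, hkf, PySem.Dict.getD_insert_of_ne (hne := hkf)]

-- the rank dict built by 'rank.setdefault(field, i)' over enumerate: get? is the first index.
theorem rank_get? (l : List String) (s : Int) (d : PySem.Dict String Int) (k : String) :
    ((PySem.List.enumerate l s).foldl (fun r p => r.setdefault p.2 p.1) d).get? k
      = if d.contains k then d.get? k
        else if k ∈ l then some (s + l.idxOf k) else none := by
  induction l generalizing s d with
  | nil =>
    simp only [PySem.List.enumerate_nil, List.foldl_nil, List.not_mem_nil, if_false]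
    by_cases hdk : d.contains k = true
    · rw [if_pos hdk]
    · rw [if_neg hdk, PySem.Dict.get?_eq_none_iff_contains]
      simpa using hdk
  | cons x t ih =>
    rw [PySem.List.enumerate_cons, List.foldl_cons, ih]
    by_cases hdk : d.contains k = true
    · have hdk' : (d.setdefault x s).contains k = true := by
        rw [PySem.Dict.contains_setdefault]; simp [hdk]
      rw [if_pos hdk', if_pos hdk]
      by_cases hkx : k = x
      · subst hkx
        rw [PySem.Dict.get?_setdefault_self]
        rw [PySem.Dict.contains_eq_isSome_get?] at hdk
        cases hg : d.get? k with
        | none => rw [hg] at hdk; simp at hdk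
        | some v => simp
      · rw [PySem.Dict.get?_setdefault_of_ne _ _ hkx]
    · have hg : d.get? k = none := by
        rw [PySem.Dict.get?_eq_none_iff_contains]; simpa using hdk
      rw [if_neg hdk]
      by_cases hkx : k = x
      · subst hkx
        have hdk' : (d.setdefault k s).contains k = true := by
          rw [PySem.Dict.contains_setdefault]; simp
        rw [if_pos hdk', PySem.Dict.get?_setdefault_self, hg]
        simp [List.idxOf_cons_self]
      · have hdk' : (d.setdefault x s).contains k = false := by
          rw [PySem.Dict.contains_setdefault]
          simp [hkx, hdk]
        rw [hdk']
        simp only [Bool.false_eq_true, if_false]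
        by_cases hkt : k ∈ t
        · have hmem : k ∈ x :: t := List.mem_cons_of_mem _ hkt
          rw [if_pos hkt, if_pos hmem, List.idxOf_cons_ne _ (fun e => hkx e.symm)]
          congr 1
          push_cast
          omega
        · have hmem : k ∉ x :: t := by simp [hkx, hkt]
          rw [if_neg hkt, if_neg hmem]

-- PySem.Set.ofList commutes with filter (first occurrences are preserved).
theorem ofList_filter (p : String → Bool) (l : List String) :
    PySem.Set.ofList (l.filter p) = (PySem.Set.ofList l).filter p := by
  induction l using List.reverseRecOn with
  | nil => rfl
  | append_singleton l x ih =>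
    rw [List.filter_append, ofList_append_singleton]
    by_cases hpx : p x = true
    · rw [List.filter_singleton, hpx]
      simp only [cond_true]
      rw [ofList_append_singleton, ih]
      by_cases hx : x ∈ l
      · have hx1 : x ∈ PySem.Set.ofList l := (PySem.Set.mem_ofList l x).mpr hx
        have hc1 : (PySem.Set.ofList l).contains x = true :=
          (PySem.Set.contains_iff _ _).mpr hx1
        have hc2 : PySem.Set.contains (List.filter p (PySem.Set.ofList l)) x = true :=
          (PySem.Set.contains_iff _ _).mpr (List.mem_filter.mpr ⟨hx1, hpx⟩)
        simp only [PySem.Set.add, hc1, hc2, if_true]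
      · have hx1 : x ∉ PySem.Set.ofList l := fun h => hx ((PySem.Set.mem_ofList l x).mp h)
        have hc1 : (PySem.Set.ofList l).contains x = false := by
          rw [Bool.eq_false_iff]; exact fun h => hx1 ((PySem.Set.contains_iff _ _).mp h)
        have hc2 : PySem.Set.contains (List.filter p (PySem.Set.ofList l)) x = false := by
          rw [Bool.eq_false_iff]
          exact fun h => hx1 (List.mem_filter.mp ((PySem.Set.contains_iff _ _).mp h)).1
        simp only [PySem.Set.add, hc1, hc2, Bool.false_eq_true, if_false,
          List.filter_append, List.filter_singleton, hpx, cond_true]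
    · have hpx' : p x = false := by simpa using hpx
      rw [List.filter_singleton, hpx']
      simp only [cond_false, List.append_nil]
      rw [ih]
      by_cases hx : x ∈ PySem.Set.ofList l
      · have hc1 : (PySem.Set.ofList l).contains x = true :=
          (PySem.Set.contains_iff _ _).mpr hx
        simp only [PySem.Set.add, hc1, if_true]
      · have hc1 : (PySem.Set.ofList l).contains x = false := by
          rw [Bool.eq_false_iff]; exact fun h => hx ((PySem.Set.contains_iff _ _).mp h)
        simp only [PySem.Set.add, hc1, Bool.false_eq_true, if_false,
          List.filter_append, List.filter_singleton, hpx', cond_false, List.append_nil]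

-- the first-occurrence list is strictly increasing in idxOf.
theorem pairwise_idxOf (l : List String) :
    (PySem.Set.ofList l).Pairwise (fun a b => l.idxOf a < l.idxOf b) := by
  induction l using List.reverseRecOn with
  | nil => exact List.Pairwise.nil
  | append_singleton l x ih =>
    rw [ofList_append_singleton]
    have hmem : ∀ a, a ∈ PySem.Set.ofList l → a ∈ l :=
      fun a ha => (PySem.Set.mem_ofList l a).mp ha
    have base : (PySem.Set.ofList l).Pairwise
        (fun a b => (l ++ [x]).idxOf a < (l ++ [x]).idxOf b) := by
      refine List.Pairwise.imp_of_mem (fun {a b} ha hb r => ?_) ih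
      rw [List.idxOf_append_of_mem (hmem _ ha), List.idxOf_append_of_mem (hmem _ hb)]
      exact r
    by_cases hx : x ∈ PySem.Set.ofList l
    · have hc : (PySem.Set.ofList l).contains x = true := (PySem.Set.contains_iff _ _).mpr hx
      have hadd : PySem.Set.add (PySem.Set.ofList l) x = PySem.Set.ofList l := by
        simp only [PySem.Set.add, hc, if_true]
      rw [hadd]; exact base
    · have hxl : x ∉ l := fun h => hx ((PySem.Set.mem_ofList l x).mpr h)
      have hc : (PySem.Set.ofList l).contains x = false := by
        rw [Bool.eq_false_iff]; exact fun h => hx ((PySem.Set.contains_iff _ _).mp h)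
      simp only [PySem.Set.add, hc, Bool.false_eq_true, if_false]
      rw [List.pairwise_append]
      refine ⟨base, List.pairwise_singleton _ _, ?_⟩
      intro a ha b hb
      rw [List.mem_singleton] at hb
      rw [hb, idxOf_append_self_of_not_mem l x hxl, List.idxOf_append_of_mem (hmem _ ha)]
      exact List.idxOf_lt_length_of_mem (hmem _ ha)

-- (Dict.ofList l).items = l when the keys of l are distinct.
theorem items_ofList_nodup (l : List (String × String)) (h : (l.map Prod.fst).Nodup) :
    (PySem.Dict.ofList l).items = l := by
  have hd : PySem.Dict.ofList l = l.foldl (fun d p => d.insert p.1 p.2) PySem.Dict.empty := by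
    simp [PySem.Dict.ofList, PySem.Dict.update]
  rw [hd]
  have := PySem.Dict.items_foldl_insert_fresh (l := l) (k := Prod.fst) (v := Prod.snd)
    (d := PySem.Dict.empty) (by intro a _; simp) h
  simpa using this

-- both sides equal the canonical payload list: deduped wanted fields present in the
-- entity, in field-chain order, paired with their entity values.
theorem canonical_A (entity : List (String × String)) (fs : List String) :
    get_py entity (some fs)
      = (PySem.Set.ofList (("type" :: "id" :: fs).filter
            (fun f => (PySem.Dict.mk entity).contains f))).map
          (fun k => (k, ((PySem.Dict.mk entity).get? k).getD "")) := by
  unfold get_py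
  simp only []
  rw [PySem.List.foldl_if_eq_foldl_filter
        (p := fun field => (PySem.Dict.mk entity).contains field)
        (f := fun (payload : PySem.Dict String String) field =>
          payload.insert field (((PySem.Dict.mk entity).get? field).getD ""))]
  have hshape : (["type", "id"] ++ fs) = ("type" :: "id" :: fs) := rfl
  rw [hshape]
  set F := ("type" :: "id" :: fs).filter (fun f => (PySem.Dict.mk entity).contains f) with hF
  set P := F.foldl
      (fun (payload : PySem.Dict String String) field =>
        payload.insert field (((PySem.Dict.mk entity).get? field).getD ""))
      PySem.Dict.empty with hP
  have hkeys : P.keys = PySem.Set.ofList F := by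
    rw [hP, PySem.Dict.keys_foldl_insert]
    rw [PySem.Set.ofList_eq_foldl]
    rfl
  have hnd : P.keys.Nodup := by
    rw [hP]
    exact PySem.Dict.nodup_keys_foldl_insert _ _ _ PySem.Dict.nodup_keys_empty
  rw [PySem.Dict.items_eq_map_keys P hnd "", hkeys]
  apply List.map_congr_left
  intro k hk
  have hkF : k ∈ F := (PySem.Set.mem_ofList F k).mp hk
  rw [hP, getD_foldl_insert_value, if_pos hkF]

theorem canonical_B (entity : List (String × String)) (fs : List String)
    (hpre : (entity.map Prod.fst).Nodup) :
    get_py_alt entity (some fs)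
      = (PySem.Set.ofList (("type" :: "id" :: fs).filter
            (fun f => (PySem.Dict.mk entity).contains f))).map
          (fun k => (k, ((PySem.Dict.mk entity).get? k).getD "")) := by
  unfold get_py_alt
  simp only []
  set fields := ("type" :: "id" :: fs) with hfields
  set rank := (PySem.List.enumerate fields 0).foldl
      (fun (r : PySem.Dict String Int) p => r.setdefault p.2 p.1) PySem.Dict.empty with hrank
  set d := PySem.Dict.mk entity with hd
  -- rank lookups
  have hget : ∀ k, rank.get? k = if k ∈ fields then some ((fields.idxOf k : Int)) else none := by
    intro k
    rw [hrank, rank_get? fields 0 PySem.Dict.empty k]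
    simp
  have hcont : ∀ k, rank.contains k = decide (k ∈ fields) := by
    intro k
    rw [PySem.Dict.contains_eq_isSome_get?, hget k]
    by_cases h : k ∈ fields <;> simp [h]
  have hgetD : ∀ k, k ∈ fields → rank.getD k 0 = (fields.idxOf k : Int) := by
    intro k hk
    rw [PySem.Dict.getD_eq_get?_getD, hget k, if_pos hk]
    rfl
  -- abbreviations
  set c := fun f => d.contains f with hc
  set V := fun f => (d.get? f).getD "" with hV
  set K := PySem.Set.ofList (fields.filter c) with hK
  have hndK : K.Nodup := by rw [hK, ← PySem.List.dedup_eq_ofList]; exact PySem.List.nodup_dedup _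
  have hndent : entity.Nodup := hpre.of_map
  have hnd' : d.keys.Nodup := hpre
  -- the filtered entity
  have hEfilt : d.items.filter (fun p => rank.contains p.1)
      = entity.filter (fun p => decide (p.1 ∈ fields)) := by
    rw [hd]
    exact List.filter_congr (fun p _ => hcont p.1)
  -- membership characterisation of entity pairs
  have hmem_ent : ∀ q : String × String, q ∈ entity ↔ (c q.1 = true ∧ q.2 = V q.1) := by
    intro q
    constructor
    · intro hq
      have hg : d.get? q.1 = some q.2 := by
        apply PySem.Dict.get?_of_mem_items
        · exact hq
        · exact hnd'
      constructor
      · rw [hc]; simp only []; rw [PySem.Dict.contains_eq_isSome_get?, hg]; rfl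
      · rw [hV]; simp only []; rw [hg]; rfl
    · intro ⟨h1, h2⟩
      have hg : (d.get? q.1).isSome := by
        rw [← PySem.Dict.contains_eq_isSome_get?]; exact h1
      obtain ⟨v, hv⟩ := Option.isSome_iff_exists.mp hg
      have : q.2 = v := by rw [h2, hV]; simp only []; rw [hv]; rfl
      have hq : d.get? q.1 = some q.2 := by rw [hv, this]
      have := PySem.Dict.mem_items_of_get?_eq_some (h := hq)
      rw [hd] at this
      exact (Prod.mk.eta (p := q)) ▸ this
  -- the permutation
  have hperm : (K.map (fun k => (k, V k))).Perm (entity.filter (fun p => decide (p.1 ∈ fields))) := by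
    apply (List.perm_ext_iff_of_nodup ?_ ?_).mpr
    · intro q
      simp only [List.mem_map, List.mem_filter, decide_eq_true_eq]
      constructor
      · rintro ⟨k, hkK, rfl⟩
        have hkf : k ∈ fields.filter c := (PySem.Set.mem_ofList _ k).mp (hK ▸ hkK)
        have h1 := (List.mem_filter.mp hkf).1
        have h2 := (List.mem_filter.mp hkf).2
        refine ⟨(hmem_ent (k, V k)).mpr ⟨h2, rfl⟩, h1⟩
      · rintro ⟨hq, hqf⟩
        obtain ⟨h1, h2⟩ := (hmem_ent q).mp hq
        refine ⟨q.1, ?_, ?_⟩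
        · rw [hK]
          exact (PySem.Set.mem_ofList _ _).mpr (List.mem_filter.mpr ⟨hqf, h1⟩)
        · rw [← h2]
    · exact hndK.map (fun a b h => congrArg Prod.fst h)
    · exact hndent.filter _
  -- hits rewritten over the filtered entity with idxOf ranks
  have hhits : (d.items.filter (fun p => rank.contains p.1)).map
        (fun p => (rank.getD p.1 0, p.1, p.2))
      = (entity.filter (fun p => decide (p.1 ∈ fields))).map
        (fun p => ((fields.idxOf p.1 : Int), p.1, p.2)) := by
    rw [hEfilt]
    apply List.map_congr_left
    intro p hp
    have : p.1 ∈ fields := by simpa using (List.mem_filter.mp hp).2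
    rw [hgetD p.1 this]
  -- the sorted hits are exactly the canonical triples
  have hsorted : PySem.List.sorted
        ((d.items.filter (fun p => rank.contains p.1)).map (fun p => (rank.getD p.1 0, p.1, p.2)))
        (fun hit => hit.1) false
      = K.map (fun k => ((fields.idxOf k : Int), k, V k)) := by
    apply PySem.List.sorted_eq_of_perm_of_pairwise_lt
    · rw [hhits]
      have h1 : K.map (fun k => ((fields.idxOf k : Int), k, V k))
          = (K.map (fun k => (k, V k))).map (fun p => ((fields.idxOf p.1 : Int), p.1, p.2)) := by
        rw [List.map_map]; rfl
      rw [h1]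
      exact hperm.map _
    · rw [List.pairwise_map]
      have hpw : (PySem.Set.ofList fields).Pairwise
          (fun a b => fields.idxOf a < fields.idxOf b) := pairwise_idxOf fields
      have hKpw : K.Pairwise (fun a b => fields.idxOf a < fields.idxOf b) := by
        rw [hK, ofList_filter]
        exact hpw.filter _
      refine hKpw.imp (fun {a b} h => ?_)
      show ((fields.idxOf a : Nat) : Int) < ((fields.idxOf b : Nat) : Int)
      exact_mod_cast h
  rw [hsorted]
  have hfinal : (K.map (fun k => ((fields.idxOf k : Int), k, V k))).map (fun t => (t.2.1, t.2.2))
      = K.map (fun k => (k, V k)) := by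
    rw [List.map_map]; rfl
  rw [hfinal, items_ofList_nodup]
  have : (K.map (fun k => (k, V k))).map Prod.fst = K := by
    have hcomp : (Prod.fst ∘ fun k => (k, V k)) = id := rfl
    rw [List.map_map, hcomp, List.map_id]
  rw [this]
  exact hndK

-- ===== VERDICT (by name: the statement is the Claim_ definition above) =====
theorem get_py_spec : Claim_equal_get_py := by
  intro entity return_fields _ hpre
  unfold Spec_get_py
  cases return_fields with
  | none => rfl
  | some fs => rw [canonical_A entity fs, canonical_B entity fs hpre]
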